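-- pv_equiv track=rewrite | github.com/cnoe-io/ai-platform-engineering | scripts/migrations/0.4.0/migrate_messages_to_turns.py | pair_messages
-- ===== SOURCE A (Python) =====
-- from typing import Optional
--
-- def pair_messages(messages: list[dict]) -> list[tuple[dict, Optional[dict]]]:
--     """
--     Pair messages into (user, assistant) turns.
--
--     Rules:
--     - Each user message starts a new turn.
--     - The immediately following assistant message completes it.
--     - Consecutive user messages each get their own turn (no assistant response).
--     - An orphan assistant message at the start is attached as a turn with a
--       synthetic empty user message so data is not lost.
--     - Consecutive assistant messages after one user message: only the first is
--       paired; subsequent ones become orphan turns.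
--     """
--     pairs: list[tuple[dict, Optional[dict]]] = []
--     i = 0
--
--     # Handle leading assistant messages (orphans — no prior user message)
--     while i < len(messages) and messages[i].get("role") == "assistant":
--         pairs.append(({"role": "user", "content": "", "orphan": True,
--                        "created_at": messages[i].get("created_at"),
--                        "message_id": f"synthetic-{i}"},
--                       messages[i]))
--         i += 1
--
--     while i < len(messages):
--         msg = messages[i]
--         if msg.get("role") == "user":
--             # Look ahead for the next assistant message
--             assistant: Optional[dict] = None
--             if i + 1 < len(messages) and messages[i + 1].get("role") == "assistant":
--                 assistant = messages[i + 1]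
--                 pairs.append((msg, assistant))
--                 i += 2
--             else:
--                 # No assistant response (orphan user message)
--                 pairs.append((msg, None))
--                 i += 1
--         elif msg.get("role") == "assistant":
--             # Consecutive assistant messages — treat as orphan turn
--             pairs.append(({"role": "user", "content": "", "orphan": True,
--                            "created_at": msg.get("created_at"),
--                            "message_id": f"synthetic-{i}"},
--                           msg))
--             i += 1
--         else:
--             # Unknown role — skip
--             i += 1
--
--     return pairs
-- ===== SOURCE B (Python) =====
-- from typing import Optional
--
-- def pair_messages(messages: list[dict]) -> list[tuple[dict, Optional[dict]]]:
--     """Single forward pass keeping a pending user message instead of an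
--     index-based lookahead scan."""
--     pairs: list[tuple[dict, Optional[dict]]] = []
--     pending: Optional[dict] = None
--     for i, msg in enumerate(messages):
--         role = msg.get("role")
--         if role == "user":
--             if pending is not None:
--                 pairs.append((pending, None))
--             pending = msg
--         elif role == "assistant":
--             if pending is not None:
--                 pairs.append((pending, msg))
--                 pending = None
--             else:
--                 pairs.append(({"role": "user", "content": "", "orphan": True,
--                                "created_at": msg.get("created_at"),
--                                "message_id": f"synthetic-{i}"},
--                               msg))
--         else:
--             if pending is not None:
--                 pairs.append((pending, None))
--                 pending = None
--     if pending is not None: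
--         pairs.append((pending, None))
--     return pairs
-- ===== Notes on version B (the rewrite author's own statement) =====
-- stated objective: simpler
-- what changed: A's two while-loops with an index and a one-message lookahead (plus a separate leading-orphan loop) are replaced by a single forward pass over enumerate(messages) that keeps a pending_user variable, flushed on the next user/unknown message and at the end.
import Mathlib
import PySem

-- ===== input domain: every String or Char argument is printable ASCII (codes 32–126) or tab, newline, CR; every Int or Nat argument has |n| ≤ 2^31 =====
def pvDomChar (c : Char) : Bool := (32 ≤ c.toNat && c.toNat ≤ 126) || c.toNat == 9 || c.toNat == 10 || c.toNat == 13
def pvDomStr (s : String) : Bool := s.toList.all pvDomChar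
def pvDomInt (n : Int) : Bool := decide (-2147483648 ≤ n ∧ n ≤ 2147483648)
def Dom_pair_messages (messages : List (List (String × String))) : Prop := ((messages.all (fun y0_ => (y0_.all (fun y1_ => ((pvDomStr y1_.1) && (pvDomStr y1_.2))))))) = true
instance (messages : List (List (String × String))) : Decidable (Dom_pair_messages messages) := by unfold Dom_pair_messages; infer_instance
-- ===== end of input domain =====

-- B replaces A's index-based lookahead scan (with its separate leading-assistant
-- while-loop) by one forward pass that keeps a pending user message (objective: simpler).

-- ===== PORT A =====
-- msg.get("role") == r  (None == r is False for the roles compared here)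
def pvRoleIs (m : List (String × String)) (r : String) : Bool :=
  (PySem.Dict.mk m).get? "role" == some r

-- The synthetic orphan-user dict (the identical Python literal appears in A and
-- B; shared here). In Python the values "orphan": True and a missing
-- "created_at" (None) are not strings; under the dict[str,str] type convention
-- they are rendered here as "True" and "" — a representation choice for values
-- outside the String value type, identical on both sides.
def pvSynth (i : Nat) (m : List (String × String)) : List (String × String) :=
  [("role", "user"), ("content", ""), ("orphan", "True"),
   ("created_at", ((PySem.Dict.mk m).get? "created_at").getD ""),
   ("message_id", "synthetic-" ++ PySem.Int.toStr (Int.ofNat i))]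

-- first while loop: leading assistant messages; returns (pairs, next index, rest)
def pmA_lead (i : Nat) (rest : List (List (String × String))) :
    List ((List (String × String)) × (Option (List (String × String)))) × Nat × List (List (String × String)) :=
  match rest with
  | [] => ([], i, [])
  | msg :: tl =>
    if pvRoleIs msg "assistant" then
      let (ps, j, r) := pmA_lead (i + 1) tl
      ((pvSynth i msg, some msg) :: ps, j, r)
    else ([], i, msg :: tl)

-- second while loop: lookahead pairing
def pmA_main (i : Nat) (rest : List (List (String × String))) :
    List ((List (String × String)) × (Option (List (String × String)))) :=
  match rest with
  | [] => []
  | msg :: tl =>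
    if pvRoleIs msg "user" then
      match tl with
      | m2 :: tl2 =>
        if pvRoleIs m2 "assistant" then (msg, some m2) :: pmA_main (i + 2) tl2
        else (msg, none) :: pmA_main (i + 1) (m2 :: tl2)
      | [] => (msg, none) :: pmA_main (i + 1) []
    else if pvRoleIs msg "assistant" then
      (pvSynth i msg, some msg) :: pmA_main (i + 1) tl
    else pmA_main (i + 1) tl
termination_by rest.length

def pair_messages (messages : List (List (String × String))) : List ((List (String × String)) × (Option (List (String × String)))) :=
  let (ps, j, r) := pmA_lead 0 messages
  ps ++ pmA_main j r

-- ===== PORT B =====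
def pmB_loop (i : Nat) (pending : Option (List (String × String))) (rest : List (List (String × String))) :
    List ((List (String × String)) × (Option (List (String × String)))) :=
  match rest with
  | [] =>
    match pending with
    | some u => [(u, none)]
    | none => []
  | msg :: tl =>
    if pvRoleIs msg "user" then
      match pending with
      | some u => (u, none) :: pmB_loop (i + 1) (some msg) tl
      | none => pmB_loop (i + 1) (some msg) tl
    else if pvRoleIs msg "assistant" then
      match pending with
      | some u => (u, some msg) :: pmB_loop (i + 1) none tl
      | none => (pvSynth i msg, some msg) :: pmB_loop (i + 1) none tl
    else
      match pending with
      | some u => (u, none) :: pmB_loop (i + 1) none tl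
      | none => pmB_loop (i + 1) none tl

def pair_messages_alt (messages : List (List (String × String))) : List ((List (String × String)) × (Option (List (String × String)))) :=
  pmB_loop 0 none messages

-- ===== PRECONDITION & SPEC =====
def Spec_pair_messages (messages : List (List (String × String))) (out : List ((List (String × String)) × (Option (List (String × String))))) : Prop := out = pair_messages_alt messages
instance (messages : List (List (String × String))) (out : List ((List (String × String)) × (Option (List (String × String))))) : Decidable (Spec_pair_messages messages out) := by unfold Spec_pair_messages; infer_instance

-- ===== CLAIM (what is proved, stated in full; the proofs are below) =====
def Claim_equal_pair_messages : Prop := ∀ (messages : List (List (String × String))), Dom_pair_messages messages → Spec_pair_messages messages (pair_messages messages)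

-- ===== LEMMAS AND PROOFS =====

-- A message's role is a single value: "assistant" excludes "user".
theorem pvRole_not_user (m : List (String × String))
    (h : pvRoleIs m "assistant" = true) : pvRoleIs m "user" = false := by
  simp only [pvRoleIs, beq_iff_eq] at h
  simp [pvRoleIs, h]

-- A's leading-assistant loop is redundant: its assistant branch coincides with
-- the main loop's, so the prefix it emits folds back into pmA_main.
theorem pmA_lead_fold (i : Nat) (rest : List (List (String × String))) :
    (pmA_lead i rest).1 ++ pmA_main (pmA_lead i rest).2.1 (pmA_lead i rest).2.2
      = pmA_main i rest := by
  induction rest generalizing i with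
  | nil => simp [pmA_lead]
  | cons msg tl ih =>
    by_cases ha : pvRoleIs msg "assistant" = true
    · have hu := pvRole_not_user msg ha
      have h1 : pmA_lead i (msg :: tl) =
          ((pvSynth i msg, some msg) :: (pmA_lead (i+1) tl).1,
           (pmA_lead (i+1) tl).2.1, (pmA_lead (i+1) tl).2.2) := by
        rw [pmA_lead]; simp [ha]
      rw [h1]
      conv_rhs => rw [pmA_main.eq_def]
      simp only [hu, Bool.false_eq_true, if_false, ha, if_true, List.cons_append]
      exact congrArg _ (ih (i + 1))
    · simp only [pmA_lead, ha]
      simp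

-- Flushing the pending user when the next message is not an assistant equals
-- emitting the orphan turn first and continuing with no pending user.
theorem pmB_flush (i : Nat) (u : List (String × String)) (tl : List (List (String × String)))
    (h : ∀ m ∈ tl.head?, pvRoleIs m "assistant" = false) :
    pmB_loop i (some u) tl = (u, none) :: pmB_loop i none tl := by
  cases tl with
  | nil => simp [pmB_loop]
  | cons m t =>
    have hm : pvRoleIs m "assistant" = false := h m (by simp)
    by_cases hu : pvRoleIs m "user" = true
    · simp [pmB_loop, hu]
    · simp [pmB_loop, hu, hm]

-- Core invariant: A's lookahead loop and B's pending-user loop (with no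
-- pending user) agree on every suffix.
theorem pmA_main_eq_pmB (i : Nat) (rest : List (List (String × String))) :
    pmA_main i rest = pmB_loop i none rest := by
  induction i, rest using pmA_main.induct with
  | case1 i => simp [pmA_main, pmB_loop]
  | case2 i msg hu m2 tl2 ha ih =>
    -- user followed by assistant
    rw [pmA_main, pmB_loop]
    simp only [hu, ha, if_true]
    rw [pmB_loop]
    simp only [pvRole_not_user m2 ha, Bool.false_eq_true, if_false, ha, if_true]
    exact congrArg _ ih
  | case3 i msg hu m2 tl2 ha ih =>
    -- user not followed by assistant
    have ha' : pvRoleIs m2 "assistant" = false := by simpa using ha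
    rw [pmA_main, pmB_loop]
    simp only [hu, ha', Bool.false_eq_true, if_false, if_true]
    rw [pmB_flush _ _ _ (by intro m hm; simp at hm; subst hm; exact ha')]
    exact congrArg _ ih
  | case4 i msg hu ih =>
    -- lone trailing user
    simp [pmA_main, pmB_loop, hu]
  | case5 i msg tl hu ha ih =>
    -- orphan assistant: both emit the synthetic turn
    have hu' : pvRoleIs msg "user" = false := by simpa using hu
    rw [pmA_main.eq_def, pmB_loop]
    simp only [hu', Bool.false_eq_true, if_false, ha, if_true]
    exact congrArg _ ih
  | case6 i msg tl hu ha ih =>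
    -- unknown role: both skip it (B has no pending user to flush)
    have hu' : pvRoleIs msg "user" = false := by simpa using hu
    have ha' : pvRoleIs msg "assistant" = false := by simpa using ha
    rw [pmA_main.eq_def, pmB_loop]
    simp only [hu', ha', Bool.false_eq_true, if_false]
    exact ih

-- ===== VERDICT (by name: the statement is the Claim_ definition above) =====
theorem pair_messages_spec : Claim_equal_pair_messages := by
  intro messages _hDom
  unfold Spec_pair_messages pair_messages pair_messages_alt
  calc (pmA_lead 0 messages).1
        ++ pmA_main (pmA_lead 0 messages).2.1 (pmA_lead 0 messages).2.2
      = pmA_main 0 messages := pmA_lead_fold 0 messages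
    _ = pmB_loop 0 none messages := pmA_main_eq_pmB 0 messages
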